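-- pv_equiv track=rewrite | github.com/kushal-dudipala/research-murtylab | paper_replication/interpreter.py | assign_brain_regions
-- ===== SOURCE A (Python) =====
-- brain_region_mapping = {
--     "face": "FFA (Fusiform Face Area)",
--     "building": "PPA (Parahippocampal Place Area)",
--     "animal": "EBA (Extrastriate Body Area)",
--     "body part": "EBA (Extrastriate Body Area)",
--     "foot": "EBA (Extrastriate Body Area)",
--     "hand": "EBA (Extrastriate Body Area)",
--     "arm": "EBA (Extrastriate Body Area)",
--     "leg": "EBA (Extrastriate Body Area)",
--     "head": "EBA (Extrastriate Body Area)",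
--     "car": "LOC (Lateral Occipital Complex)",
--     "landscape": "RSC (Retrosplenial Cortex)",
--     "torso": "EBA (Extrastriate Body Area)",
-- }
--
-- def assign_brain_regions(classifications):
--     sorted_output = {}
--     for category, images in classifications.items():
--         brain_region = brain_region_mapping.get(category, "Unknown Region")
--         if brain_region not in sorted_output:
--             sorted_output[brain_region] = []
--         sorted_output[brain_region].extend(images)
--     return sorted_output
-- ===== SOURCE B (Python) =====
-- brain_region_mapping = {
--     "face": "FFA (Fusiform Face Area)",
--     "building": "PPA (Parahippocampal Place Area)",
--     "animal": "EBA (Extrastriate Body Area)",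
--     "body part": "EBA (Extrastriate Body Area)",
--     "foot": "EBA (Extrastriate Body Area)",
--     "hand": "EBA (Extrastriate Body Area)",
--     "arm": "EBA (Extrastriate Body Area)",
--     "leg": "EBA (Extrastriate Body Area)",
--     "head": "EBA (Extrastriate Body Area)",
--     "car": "LOC (Lateral Occipital Complex)",
--     "landscape": "RSC (Retrosplenial Cortex)",
--     "torso": "EBA (Extrastriate Body Area)",
-- }
--
-- def assign_brain_regions(classifications):
--     # Two-pass: list the distinct regions in first-appearance order, then build
--     # each region's image list with one comprehension (no mutable accumulation).
--     items = list(classifications.items())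
--     regions = dict.fromkeys(brain_region_mapping.get(c, "Unknown Region") for c, _ in items)
--     return {r: [img for c, imgs in items
--                 if brain_region_mapping.get(c, "Unknown Region") == r
--                 for img in imgs]
--             for r in regions}
-- ===== Notes on version B (the rewrite author's own statement) =====
-- stated objective: alternative
-- what changed: Instead of A's single pass that mutates a dict (inserting empty lists and extending them), B makes two declarative passes: dict.fromkeys collects the distinct brain regions in first-appearance order, then a comprehension per region concatenates the image lists of all categories mapping to it.
import Mathlib
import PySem

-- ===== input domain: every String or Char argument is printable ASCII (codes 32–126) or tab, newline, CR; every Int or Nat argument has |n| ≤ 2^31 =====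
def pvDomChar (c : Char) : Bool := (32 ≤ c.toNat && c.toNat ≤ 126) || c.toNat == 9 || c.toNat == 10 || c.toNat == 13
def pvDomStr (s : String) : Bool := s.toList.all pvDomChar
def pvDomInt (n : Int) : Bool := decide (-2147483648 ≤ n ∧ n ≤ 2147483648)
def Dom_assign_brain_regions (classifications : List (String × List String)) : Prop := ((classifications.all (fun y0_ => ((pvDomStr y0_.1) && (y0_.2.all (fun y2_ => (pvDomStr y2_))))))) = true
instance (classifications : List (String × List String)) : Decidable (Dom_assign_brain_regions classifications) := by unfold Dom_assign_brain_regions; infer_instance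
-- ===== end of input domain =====

-- B regroups A's single mutating-dict pass into two declarative passes (distinct regions, then one
-- concatenation per region); objective: alternative decomposition, same return value.

-- ===== PORT A =====
-- module-level constant used by both Python versions
def brain_region_mapping : PySem.Dict String String := PySem.Dict.ofList [
  ("face", "FFA (Fusiform Face Area)"),
  ("building", "PPA (Parahippocampal Place Area)"),
  ("animal", "EBA (Extrastriate Body Area)"),
  ("body part", "EBA (Extrastriate Body Area)"),
  ("foot", "EBA (Extrastriate Body Area)"),
  ("hand", "EBA (Extrastriate Body Area)"),
  ("arm", "EBA (Extrastriate Body Area)"),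
  ("leg", "EBA (Extrastriate Body Area)"),
  ("head", "EBA (Extrastriate Body Area)"),
  ("car", "LOC (Lateral Occipital Complex)"),
  ("landscape", "RSC (Retrosplenial Cortex)"),
  ("torso", "EBA (Extrastriate Body Area)")]

-- brain_region_mapping.get(category, "Unknown Region") (appears verbatim in both Pythons)
def brRegion (category : String) : String :=
  PySem.Dict.getD brain_region_mapping category "Unknown Region"

-- for category, images: if region not in dict, insert []; then dict[region].extend(images)
-- ('extend' mutates the stored list in place = modify; the key is present at that point, dflt [] unused)
def assign_brain_regions (classifications : List (String × List String)) : List (String × List String) :=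
  (classifications.foldl
    (fun sorted_output ci =>
      let brain_region := brRegion ci.1
      let d := if sorted_output.contains brain_region then sorted_output
               else sorted_output.insert brain_region []
      d.modify brain_region [] (fun l => l ++ ci.2))
    PySem.Dict.empty).items

-- ===== PORT B =====
-- regions = dict.fromkeys(...) = ordered dedup (PySem.List.dedup); then one comprehension per region
def assign_brain_regions_alt (classifications : List (String × List String)) : List (String × List String) :=
  let regions := PySem.List.dedup (classifications.map (fun ci => brRegion ci.1))
  regions.map (fun r =>
    (r, classifications.flatMap (fun ci => if brRegion ci.1 == r then ci.2 else [])))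

-- ===== PRECONDITION & SPEC =====
def Spec_assign_brain_regions (classifications : List (String × List String)) (out : List (String × List String)) : Prop := out = assign_brain_regions_alt classifications
instance (classifications : List (String × List String)) (out : List (String × List String)) : Decidable (Spec_assign_brain_regions classifications out) := by unfold Spec_assign_brain_regions; infer_instance

-- ===== CLAIM (what is proved, stated in full; the proofs are below) =====
def Claim_equal_assign_brain_regions : Prop := ∀ (classifications : List (String × List String)), Dom_assign_brain_regions classifications → Spec_assign_brain_regions classifications (assign_brain_regions classifications)

-- ===== LEMMAS AND PROOFS =====

-- A's loop body (setdefault-style insert then extend) is exactly one Dict.modify.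
lemma step_eq (d : PySem.Dict String (List String)) (ci : String × List String) :
    (if d.contains (brRegion ci.1) then d else d.insert (brRegion ci.1) []).modify
        (brRegion ci.1) [] (fun l => l ++ ci.2)
      = d.modify (brRegion ci.1) [] (fun l => l ++ ci.2) := by
  by_cases h : d.contains (brRegion ci.1)
  · simp [h]
  · simp only [Bool.not_eq_true] at h
    simp [h, PySem.Dict.modify, PySem.Dict.getD_insert_self, PySem.Dict.insert_insert_self,
      PySem.Dict.getD_of_not_contains d [] h]

lemma foldl_step_eq (l : List (String × List String)) (d : PySem.Dict String (List String)) :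
    l.foldl (fun sorted_output ci =>
        let brain_region := brRegion ci.1
        let d := if sorted_output.contains brain_region then sorted_output
                 else sorted_output.insert brain_region []
        d.modify brain_region [] (fun l => l ++ ci.2)) d
      = l.foldl (fun d ci => d.modify (brRegion ci.1) [] (fun l => l ++ ci.2)) d := by
  induction l generalizing d with
  | nil => rfl
  | cons a t ih => simp only [List.foldl_cons]; rw [step_eq]; exact ih _

-- value accumulated at key r by the modify-loop
lemma getD_loop (l : List (String × List String)) (d : PySem.Dict String (List String)) (r : String) :
    (l.foldl (fun d ci => d.modify (brRegion ci.1) [] (fun l => l ++ ci.2)) d).getD r []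
      = d.getD r [] ++ l.flatMap (fun ci => if brRegion ci.1 == r then ci.2 else []) := by
  induction l generalizing d with
  | nil => simp
  | cons a t ih =>
    simp only [List.foldl_cons, List.flatMap_cons, ih, PySem.Dict.getD_modify]
    by_cases h : r = brRegion a.1
    · simp [h, List.append_assoc]
    · have h' : (brRegion a.1 == r) = false := by
        simp; exact fun e => h e.symm
      simp [h, h']

-- ===== VERDICT (by name: the statement is the Claim_ definition above) =====
theorem assign_brain_regions_spec : Claim_equal_assign_brain_regions := by
  intro classifications _
  unfold Spec_assign_brain_regions assign_brain_regions assign_brain_regions_alt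
  rw [foldl_step_eq]
  have hnd : (classifications.foldl
      (fun d ci => d.modify (brRegion ci.1) [] (fun l => l ++ ci.2)) PySem.Dict.empty).keys.Nodup := by
    apply PySem.Dict.nodup_keys_foldl_modify_key classifications (fun ci => brRegion ci.1) []
      (fun _ ci => fun l => l ++ ci.2)
    simp
  rw [PySem.Dict.items_eq_map_keys _ hnd []]
  have hkeys : (classifications.foldl
      (fun d ci => d.modify (brRegion ci.1) [] (fun l => l ++ ci.2)) PySem.Dict.empty).keys
      = PySem.List.dedup (classifications.map (fun ci => brRegion ci.1)) := by
    rw [PySem.Dict.keys_foldl_modify_key classifications (fun ci => brRegion ci.1) []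
      (fun _ ci => fun l => l ++ ci.2), PySem.List.dedup_eq_ofList]
    simp [PySem.Set.update_nil_left]
  rw [hkeys]
  apply List.map_congr_left
  intro r _
  rw [getD_loop]
  simp
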